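-- pv_equiv track=rewrite | github.com/jonahgabriel/cursor-guardrails | scripts/check_dockerfile.py | parse_dockerfile
-- ===== SOURCE A (Python) =====
-- from typing import Dict, List, Set, Tuple
--
-- def parse_dockerfile(content: str) -> List[Tuple[str, str]]:
--     """Parse Dockerfile content into a list of (instruction, argument) tuples."""
--     instructions = []
--     current_instruction = None
--     current_args = []
--
--     for line in content.split("\n"):
--         line = line.strip()
--         if not line or line.startswith("#"):
--             continue
--
--         if line.endswith("\\"):
--             if current_instruction is None:
--                 instruction, arg = line.split(None, 1)
--                 current_instruction = instruction
--                 current_args = [arg.rstrip("\\").strip()]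
--             else:
--                 current_args.append(line.rstrip("\\").strip())
--         else:
--             if current_instruction is not None:
--                 current_args.append(line)
--                 instructions.append((current_instruction, " ".join(current_args)))
--                 current_instruction = None
--                 current_args = []
--             else:
--                 instruction, arg = line.split(None, 1)
--                 instructions.append((instruction, arg))
--
--     return instructions
-- ===== SOURCE B (Python) =====
-- from typing import List, Tuple
--
--
-- def parse_dockerfile(content: str) -> List[Tuple[str, str]]:
--     """Parse Dockerfile content into a list of (instruction, argument) tuples.
--
--     Two passes: first clean the lines and group them into logical instructions
--     (a chunk keeps growing while its lines end with a backslash; an unfinished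
--     trailing chunk is dropped), then turn each chunk into a tuple.
--     """
--     cleaned = [line for line in (raw.strip() for raw in content.split("\n"))
--                if line and not line.startswith("#")]
--
--     groups = []
--     chunk = []
--     for line in cleaned:
--         chunk.append(line)
--         if not line.endswith("\\"):
--             groups.append(chunk)
--             chunk = []
--
--     out = []
--     for g in groups:
--         instruction, rest = g[0].split(None, 1)
--         if len(g) == 1:
--             out.append((instruction, rest))
--         else:
--             parts = ([rest.rstrip("\\").strip()]
--                      + [l.rstrip("\\").strip() for l in g[1:-1]]
--                      + [g[-1]])
--             out.append((instruction, " ".join(parts)))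
--     return out
-- ===== Notes on version B (the rewrite author's own statement) =====
-- stated objective: alternative
-- what changed: A is a one-pass state machine threading (current_instruction, current_args) through every line; B first groups the cleaned lines into logical-instruction chunks (closing a chunk on a line not ending in a backslash, dropping an unfinished trailing chunk) and then maps each chunk to its (instruction, args) tuple in a second pass.
import Mathlib
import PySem

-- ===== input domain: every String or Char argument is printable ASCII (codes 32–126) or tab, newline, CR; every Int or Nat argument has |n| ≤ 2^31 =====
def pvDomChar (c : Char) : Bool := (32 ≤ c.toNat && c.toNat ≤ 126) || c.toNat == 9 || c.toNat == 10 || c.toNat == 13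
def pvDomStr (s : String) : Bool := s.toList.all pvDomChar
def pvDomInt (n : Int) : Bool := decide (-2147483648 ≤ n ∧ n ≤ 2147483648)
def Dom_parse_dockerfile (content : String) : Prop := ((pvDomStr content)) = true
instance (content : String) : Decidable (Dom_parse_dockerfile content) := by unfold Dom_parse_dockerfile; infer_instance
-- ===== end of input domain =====

-- B re-decomposes A's one-pass state machine into clean-and-group then emit-per-group (objective: alternative; same cost).

-- `line.rstrip("\\")` — drop every trailing backslash (exact: rstrip with a one-char set)
def pvRstripBS (cs : List Char) : List Char := (cs.reverse.dropWhile (· == '\\')).reverse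

-- `l.rstrip("\\").strip()`
def pvSR (l : List Char) : List Char := PySem.Chars.strip (pvRstripBS l)

-- ===== PORT A =====
-- the loop body after `line = line.strip()` passed the skip test (A's state: instructions, current_instruction, current_args)
def paCore (st : List (String × String) × Option (List Char) × List (List Char)) (line : List Char) :
    List (String × String) × Option (List Char) × List (List Char) :=
  if PySem.Chars.endswith line ['\\'] then
    match st.2.1 with
    | none =>
      match PySem.Chars.split₀Max line 1 with
      | [instruction, arg] => (st.1, some instruction, [pvSR arg])
      | _ => st            -- Python raises ValueError here; excluded by Pre_
    | some _ => (st.1, st.2.1, st.2.2 ++ [pvSR line])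
  else
    match st.2.1 with
    | some instr =>
        (st.1 ++ [(String.ofList instr, String.ofList (PySem.Chars.join [' '] (st.2.2 ++ [line])))], none, [])
    | none =>
      match PySem.Chars.split₀Max line 1 with
      | [instruction, arg] => (st.1 ++ [(String.ofList instruction, String.ofList arg)], none, [])
      | _ => st            -- Python raises ValueError here; excluded by Pre_

def paStep (st : List (String × String) × Option (List Char) × List (List Char)) (raw : List Char) :
    List (String × String) × Option (List Char) × List (List Char) :=
  let line := PySem.Chars.strip raw
  if line.isEmpty || PySem.Chars.startswith line ['#'] then st else paCore st line

def parse_dockerfile (content : String) : List (String × String) :=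
  ((PySem.Chars.splitOn content.toList ['\n']).foldl paStep ([], none, [])).1

-- ===== PORT B =====
-- the cleaning comprehension of Source B
def pvCleanLines (lines : List (List Char)) : List (List Char) :=
  (lines.map PySem.Chars.strip).filter (fun l => !(l.isEmpty || PySem.Chars.startswith l ['#']))

def pvClean (content : String) : List (List Char) :=
  pvCleanLines (PySem.Chars.splitOn content.toList ['\n'])

-- grouping loop of Source B (state: groups, chunk)
def pbGroupStep (st : List (List (List Char)) × List (List Char)) (line : List Char) :
    List (List (List Char)) × List (List Char) :=
  let chunk := st.2 ++ [line]
  if PySem.Chars.endswith line ['\\'] then (st.1, chunk) else (st.1 ++ [chunk], [])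

-- emit loop body of Source B
def pbEmit (g : List (List Char)) : String × String :=
  match g with
  | [] => ("", "")                                   -- unreachable: built chunks are nonempty
  | f :: tl =>
    match PySem.Chars.split₀Max f 1 with
    | [instruction, rest] =>
      if tl = [] then (String.ofList instruction, String.ofList rest)
      else (String.ofList instruction, String.ofList (PySem.Chars.join [' ']
              ([pvSR rest] ++ tl.dropLast.map pvSR ++ [tl.getLastD []])))
    | _ => ("", "")                                  -- Python raises ValueError here; excluded by Pre_

def parse_dockerfile_alt (content : String) : List (String × String) :=
  (((pvClean content).foldl pbGroupStep ([], [])).1).map pbEmit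

-- ===== PRECONDITION & SPEC =====
-- does `line.split(None, 1)` yield two pieces?
def pvTok2 (l : List Char) : Bool := (PySem.Chars.split₀Max l 1).length == 2

-- scan of the cleaned lines: every line that starts a (possibly continued) instruction must have two pieces
def pvPreScan : List (List Char) → Bool → Bool
  | [], _ => true
  | l :: rest, inCont => (inCont || pvTok2 l) && pvPreScan rest (PySem.Chars.endswith l ['\\'])

-- Pre_ excludes exactly the inputs on which A raises ValueError: some cleaned, kept line that starts
-- an instruction (not a continuation line) contains no whitespace, so `line.split(None, 1)` yields one token.
def Pre_parse_dockerfile (content : String) : Prop := pvPreScan (pvClean content) false = true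
instance (content : String) : Decidable (Pre_parse_dockerfile content) := by unfold Pre_parse_dockerfile; infer_instance

def pvWitness_parse_dockerfile : String :=
  "FROM ubuntu:20.04\n# comment\nRUN apt-get update \\\n    && apt-get install -y curl\nCMD echo hi"

def Spec_parse_dockerfile (content : String) (out : List (String × String)) : Prop := out = parse_dockerfile_alt content
instance (content : String) (out : List (String × String)) : Decidable (Spec_parse_dockerfile content out) := by unfold Spec_parse_dockerfile; infer_instance

-- ===== CLAIM (what is proved, stated in full; the proofs are below) =====
def Claim_equal_parse_dockerfile : Prop := ∀ (content : String), Dom_parse_dockerfile content → Pre_parse_dockerfile content → Spec_parse_dockerfile content (parse_dockerfile content)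

-- ===== LEMMAS AND PROOFS =====

-- A's in-flight state corresponds to B's open chunk
def ChunkInv : List (List Char) → Option (List Char) → List (List Char) → Prop
  | [], cur, args => cur = none ∧ args = []
  | f :: tl, cur, args =>
      ∃ h r, PySem.Chars.split₀Max f 1 = [h, r] ∧ cur = some h ∧ args = pvSR r :: tl.map pvSR

lemma fold_group_prefix (ls : List (List Char)) (gs : List (List (List Char))) (c : List (List Char)) :
    ls.foldl pbGroupStep (gs, c)
      = (gs ++ (ls.foldl pbGroupStep ([], c)).1, (ls.foldl pbGroupStep ([], c)).2) := by
  induction ls generalizing gs c with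
  | nil => simp
  | cons l r ih =>
    simp only [List.foldl_cons, pbGroupStep]
    by_cases h : PySem.Chars.endswith l ['\\'] = true
    · simp only [h, if_true]
      exact ih gs (c ++ [l])
    · simp only [h, Bool.false_eq_true, if_false, List.nil_append]
      rw [ih (gs ++ [c ++ [l]]) [], ih [c ++ [l]] []]
      simp

-- the main loop correspondence: A's fold over the raw lines equals B's group-then-emit,
-- for any in-flight chunk related by ChunkInv
lemma main_loop (lines : List (List Char)) (acc : List (String × String))
    (c : List (List Char)) (cur : Option (List Char)) (args : List (List Char))
    (hinv : ChunkInv c cur args)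
    (hpre : pvPreScan (pvCleanLines lines) (!c.isEmpty) = true) :
    (lines.foldl paStep (acc, cur, args)).1
      = acc ++ (((pvCleanLines lines).foldl pbGroupStep ([], c)).1).map pbEmit := by
  induction lines generalizing acc c cur args with
  | nil => simp [pvCleanLines]
  | cons raw r ih =>
    by_cases hk : ((PySem.Chars.strip raw).isEmpty || PySem.Chars.startswith (PySem.Chars.strip raw) ['#']) = true
    · -- skipped line
      have hk' : PySem.Chars.strip raw = [] ∨ PySem.Chars.startswith (PySem.Chars.strip raw) ['#'] = true := by
        simpa [List.isEmpty_iff] using hk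
      have hclean : pvCleanLines (raw :: r) = pvCleanLines r := by
        simp only [pvCleanLines, List.map_cons, List.filter_cons]
        rcases hk' with h | h
        · simp [h]
        · simp [h]
      rw [hclean] at hpre ⊢
      have hstep : paStep (acc, cur, args) raw = (acc, cur, args) := by
        simp [paStep, hk]
      rw [List.foldl_cons, hstep]
      exact ih acc c cur args hinv hpre
    · -- kept line l
      set l := PySem.Chars.strip raw with hl
      have hk' : ¬ PySem.Chars.strip raw = [] ∧ PySem.Chars.startswith (PySem.Chars.strip raw) ['#'] = false := by
        simpa [List.isEmpty_iff, not_or] using hk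
      have hclean : pvCleanLines (raw :: r) = l :: pvCleanLines r := by
        simp only [pvCleanLines, List.map_cons, List.filter_cons]
        simp [hk'.1, hk'.2, hl]
      rw [hclean] at hpre ⊢
      have hstep : paStep (acc, cur, args) raw = paCore (acc, cur, args) l := by
        simp [paStep, ← hl, hk]
      rw [List.foldl_cons, hstep, List.foldl_cons]
      simp only [pvPreScan, Bool.and_eq_true] at hpre
      obtain ⟨hp1, hp2⟩ := hpre
      by_cases he : PySem.Chars.endswith l ['\\'] = true
      · -- continuation line
        cases c with
        | nil =>
          obtain ⟨hcur, hargs⟩ := hinv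
          subst hcur hargs
          have htok : pvTok2 l = true := by simpa using hp1
          simp only [pvTok2, beq_iff_eq] at htok
          obtain ⟨h0, r0, hsplit⟩ : ∃ h0 r0, PySem.Chars.split₀Max l 1 = [h0, r0] := by
            rcases hs : PySem.Chars.split₀Max l 1 with _ | ⟨a, _ | ⟨b, _ | ⟨z, t⟩⟩⟩ <;>
              simp [hs] at htok ⊢
          simp only [paCore, he, if_true, hsplit]
          simp only [pbGroupStep, he, if_true, List.nil_append]
          exact ih acc [l] (some h0) [pvSR r0] ⟨h0, r0, hsplit, rfl, by simp⟩ (by simpa [he] using hp2)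
        | cons f tl =>
          obtain ⟨h0, r0, hsplit, hcur, hargs⟩ := hinv
          subst hcur hargs
          simp only [paCore, he, if_true]
          simp only [pbGroupStep, he, if_true]
          have harg : (pvSR r0 :: tl.map pvSR) ++ [pvSR l] = pvSR r0 :: (tl ++ [l]).map pvSR := by simp
          rw [harg]
          exact ih acc (f :: (tl ++ [l])) (some h0) (pvSR r0 :: (tl ++ [l]).map pvSR)
            ⟨h0, r0, hsplit, rfl, rfl⟩ (by simpa [he] using hp2)
      · -- group-closing line
        have hb : PySem.Chars.endswith l ['\\'] = false := by simpa using he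
        cases c with
        | nil =>
          obtain ⟨hcur, hargs⟩ := hinv
          subst hcur hargs
          have htok : pvTok2 l = true := by simpa using hp1
          simp only [pvTok2, beq_iff_eq] at htok
          obtain ⟨h0, r0, hsplit⟩ : ∃ h0 r0, PySem.Chars.split₀Max l 1 = [h0, r0] := by
            rcases hs : PySem.Chars.split₀Max l 1 with _ | ⟨a, _ | ⟨b, _ | ⟨z, t⟩⟩⟩ <;>
              simp [hs] at htok ⊢
          simp only [paCore, hb, Bool.false_eq_true, if_false, hsplit]
          simp only [pbGroupStep, hb, Bool.false_eq_true, if_false, List.nil_append]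
          rw [fold_group_prefix (pvCleanLines r) [[l]] []]
          rw [ih (acc ++ [(String.ofList h0, String.ofList r0)]) [] none [] ⟨rfl, rfl⟩ (by simpa [hb] using hp2)]
          simp [pbEmit, hsplit]
        | cons f tl =>
          obtain ⟨h0, r0, hsplit, hcur, hargs⟩ := hinv
          subst hcur hargs
          simp only [paCore, hb, Bool.false_eq_true, if_false]
          simp only [pbGroupStep, hb, Bool.false_eq_true, if_false, List.nil_append]
          rw [fold_group_prefix (pvCleanLines r) [(f :: tl) ++ [l]] []]
          rw [ih (acc ++ [(String.ofList h0,
                String.ofList (PySem.Chars.join [' '] ((pvSR r0 :: tl.map pvSR) ++ [l])))])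
              [] none [] ⟨rfl, rfl⟩ (by simpa [hb] using hp2)]
          have hemit : pbEmit (f :: (tl ++ [l]))
              = (String.ofList h0, String.ofList (PySem.Chars.join [' '] (pvSR r0 :: (tl.map pvSR ++ [l])))) := by
            simp only [pbEmit, hsplit]
            rw [if_neg (by simp : ¬ tl ++ [l] = [])]
            simp [List.dropLast_concat, List.getLastD_eq_getLast?, List.getLast?_concat]
          simp [hemit]

-- ===== VERDICT (by name: the statement is the Claim_ definition above) =====
theorem parse_dockerfile_spec : Claim_equal_parse_dockerfile := by
  intro content _ hpre
  unfold Spec_parse_dockerfile parse_dockerfile parse_dockerfile_alt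
  exact main_loop (PySem.Chars.splitOn content.toList ['\n']) [] [] none [] ⟨rfl, rfl⟩ hpre
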